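-- pv_equiv track=rewrite | github.com/Independent-AI-Labs/AMI-FILES | scripts/convert_extensions.py | build_extension_payload
-- ===== SOURCE A (Python) =====
-- from collections.abc import Iterable, Mapping
--
-- BINARY_EXTENSIONS: set[str] = {
--     ".exe",
--     ".dll",
--     ".so",
--     ".dylib",
--     ".o",
--     ".a",
--     ".lib",
--     ".class",
--     ".pyc",
--     ".pyo",
-- }
--
-- CATEGORY_RULES: dict[str, set[str]] = {
--     "markup": {".html", ".xml", ".svg", ".xhtml", ".xht", ".xaml"},
--     "config": {".json", ".yaml", ".yml", ".toml", ".ini", ".cfg", ".conf", ".properties"},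
--     "data": {".csv", ".tsv", ".sql", ".graphql"},
--     "documentation": {".md", ".markdown", ".rst", ".txt", ".asciidoc", ".adoc"},
--     "other": {".diff", ".patch", ".log"},
-- }
--
-- CATEGORY_DESCRIPTIONS: dict[str, str] = {
--     "markup": "Markup ({lang})",
--     "config": "Configuration ({lang})",
--     "data": "Data format ({lang})",
--     "documentation": "Documentation ({lang})",
--     "other": "Other text ({lang})",
--     "programming": "{lang}",
-- }
--
-- def categorise_extension(ext: str) -> str:
--     """Determine the category for a given extension."""
--
--     for category, candidates in CATEGORY_RULES.items():
--         if ext in candidates: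
--             return category
--     return "programming"
--
-- def language_summary(languages: Iterable[str]) -> str:
--     """Provide a short human-readable summary for language usage."""
--
--     ordered = sorted(languages)
--     if not ordered:
--         return "unknown"
--     if len(ordered) == 1:
--         return ordered[0]
--     return f"{ordered[0]} and others"
--
-- def build_extension_payload(extension_map: dict[str, set[str]]) -> tuple[dict[str, list[dict[str, str]]], list[str]]:
--     """Build structured category data and a flat extension list."""
--
--     text_extensions: dict[str, list[dict[str, str]]] = {
--         "programming": [],
--         "markup": [],
--         "config": [],
--         "data": [],
--         "documentation": [],
--         "other": [],
--     }
--     all_extensions: list[str] = []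
--
--     for ext in sorted(extension_map):
--         if ext in BINARY_EXTENSIONS:
--             continue
--
--         category = categorise_extension(ext)
--         summary = language_summary(extension_map[ext])
--         description_template = CATEGORY_DESCRIPTIONS[category]
--         entry = {"ext": ext, "desc": description_template.format(lang=summary)}
--
--         text_extensions[category].append(entry)
--         if ext not in all_extensions:
--             all_extensions.append(ext)
--
--     all_extensions.sort()
--     return text_extensions, all_extensions
-- ===== SOURCE B (Python) =====
-- BINARY_EXTENSIONS: set[str] = {
--     ".exe", ".dll", ".so", ".dylib", ".o", ".a", ".lib", ".class", ".pyc", ".pyo",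
-- }
--
-- CATEGORY_RULES: dict[str, set[str]] = {
--     "markup": {".html", ".xml", ".svg", ".xhtml", ".xht", ".xaml"},
--     "config": {".json", ".yaml", ".yml", ".toml", ".ini", ".cfg", ".conf", ".properties"},
--     "data": {".csv", ".tsv", ".sql", ".graphql"},
--     "documentation": {".md", ".markdown", ".rst", ".txt", ".asciidoc", ".adoc"},
--     "other": {".diff", ".patch", ".log"},
-- }
--
-- CATEGORY_DESCRIPTIONS: dict[str, str] = {
--     "markup": "Markup ({lang})",
--     "config": "Configuration ({lang})",
--     "data": "Data format ({lang})",
--     "documentation": "Documentation ({lang})",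
--     "other": "Other text ({lang})",
--     "programming": "{lang}",
-- }
--
-- # Reverse index ext -> category, built once (the rule sets are disjoint).
-- _CATEGORY_OF: dict[str, str] = {e: c for c, exts in CATEGORY_RULES.items() for e in exts}
--
-- _ORDER = ("programming", "markup", "config", "data", "documentation", "other")
--
--
-- def _describe(category: str, languages) -> str:
--     if not languages:
--         summary = "unknown"
--     else:
--         summary = min(languages)
--         if len(languages) > 1:
--             summary += " and others"
--     return CATEGORY_DESCRIPTIONS[category].format(lang=summary)
--
--
-- def build_extension_payload(extension_map: dict[str, set[str]]) -> tuple[dict[str, list[dict[str, str]]], list[str]]: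
--     """Category-major construction: filter + sort once, then one comprehension per category."""
--
--     eligible = sorted(
--         ((ext, langs) for ext, langs in extension_map.items() if ext not in BINARY_EXTENSIONS),
--         key=lambda p: p[0],
--     )
--     text_extensions = {
--         cat: [
--             {"ext": ext, "desc": _describe(cat, langs)}
--             for ext, langs in eligible
--             if _CATEGORY_OF.get(ext, "programming") == cat
--         ]
--         for cat in _ORDER
--     }
--     return text_extensions, [ext for ext, _ in eligible]
-- ===== Notes on version B (the rewrite author's own statement) =====
-- stated objective: faster
-- what changed: B is category-major instead of extension-major: it filters and sorts the items once, emits the flat list directly from that sorted eligible list, and builds each category's entries by an independent per-category comprehension over a precomputed reverse index ext->category, instead of A's single pass over sorted keys that mutates six buckets, re-scans the category rule sets per key, scans all_extensions for membership, sorts each language set and re-sorts the final list.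
import Mathlib
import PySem

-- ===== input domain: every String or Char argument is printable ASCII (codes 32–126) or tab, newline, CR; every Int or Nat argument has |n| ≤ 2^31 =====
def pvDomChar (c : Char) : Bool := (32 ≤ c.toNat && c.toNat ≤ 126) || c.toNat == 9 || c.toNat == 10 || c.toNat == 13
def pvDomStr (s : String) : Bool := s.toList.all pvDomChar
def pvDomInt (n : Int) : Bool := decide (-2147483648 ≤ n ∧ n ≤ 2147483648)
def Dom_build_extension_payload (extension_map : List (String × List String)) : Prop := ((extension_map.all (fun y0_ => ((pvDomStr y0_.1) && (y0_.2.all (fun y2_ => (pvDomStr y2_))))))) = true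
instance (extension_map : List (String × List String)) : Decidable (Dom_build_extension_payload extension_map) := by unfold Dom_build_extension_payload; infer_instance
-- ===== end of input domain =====

-- B is category-major where A is extension-major: B filters and sorts the items once, emits the
-- flat list directly from that sorted eligible list, and builds each category's entries by an
-- independent per-category filter over a precomputed reverse index ext→category, instead of A's
-- single pass over sorted keys mutating six buckets with per-key inner scans; equivalence of the
-- RETURN value is proved on association lists with unique keys (a Python dict always has unique keys).

-- ===== PORT A =====
-- module constants (shared by both Python files)
def pvBinaryExtensions : List String :=
  [".exe", ".dll", ".so", ".dylib", ".o", ".a", ".lib", ".class", ".pyc", ".pyo"]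

def pvCategoryRules : List (String × List String) :=
  [("markup", [".html", ".xml", ".svg", ".xhtml", ".xht", ".xaml"]),
   ("config", [".json", ".yaml", ".yml", ".toml", ".ini", ".cfg", ".conf", ".properties"]),
   ("data", [".csv", ".tsv", ".sql", ".graphql"]),
   ("documentation", [".md", ".markdown", ".rst", ".txt", ".asciidoc", ".adoc"]),
   ("other", [".diff", ".patch", ".log"])]

def pvCategoryDescriptions : List (String × String) :=
  [("markup", "Markup ({lang})"), ("config", "Configuration ({lang})"),
   ("data", "Data format ({lang})"), ("documentation", "Documentation ({lang})"),
   ("other", "Other text ({lang})"), ("programming", "{lang}")]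

-- first category whose candidate set contains ext, else "programming" (the for-loop with early return)
def categorise_extension (ext : String) : String :=
  match pvCategoryRules.find? (fun p => p.2.contains ext) with
  | some p => p.1
  | none => "programming"

def language_summary (languages : List String) : String :=
  match PySem.List.sorted languages (fun x => x) false with
  | [] => "unknown"
  | [x] => x
  | x :: _ :: _ => x ++ " and others"

def build_extension_payload (extension_map : List (String × List String)) : (List (String × List (List (String × String)))) × List String :=
  let text0 : PySem.Dict String (List (List (String × String))) :=
    PySem.Dict.ofList [("programming", []), ("markup", []), ("config", []), ("data", []), ("documentation", []), ("other", [])]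
  -- for ext in sorted(extension_map): …
  let st := (PySem.List.sorted (PySem.Dict.mk extension_map).keys (fun x => x) false).foldl
    (fun (st : PySem.Dict String (List (List (String × String))) × List String) ext =>
      if pvBinaryExtensions.contains ext then st
      else
        let category := categorise_extension ext
        let summary := language_summary ((PySem.Dict.mk extension_map).getD ext [])
        let entry : List (String × String) :=
          [("ext", ext), ("desc", PySem.Str.replace ((PySem.Dict.mk pvCategoryDescriptions).getD category "") "{lang}" summary)]
        (st.1.modify category [] (fun l => l ++ [entry]),
         if st.2.contains ext then st.2 else st.2 ++ [ext]))
    (text0, [])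
  (st.1.items, PySem.List.sorted st.2 (fun x => x) false)
-- `.format(lang=summary)` is ported as replacing the single "{lang}" placeholder: exact for these templates.
-- `extension_map[ext]` is ported with getD: ext always comes from the dict's keys, so the default is never used.

-- ===== PORT B =====
-- _CATEGORY_OF = {e: c for c, exts in CATEGORY_RULES.items() for e in exts}
def pvCategoryOf : PySem.Dict String String :=
  pvCategoryRules.foldl (fun d p => p.2.foldl (fun d e => d.insert e p.1) d) PySem.Dict.empty

def pvOrder : List String := ["programming", "markup", "config", "data", "documentation", "other"]

def pvDescribe (category : String) (languages : List String) : String :=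
  let summary :=
    match languages with
    | [] => "unknown"
    | _ =>
      let m := (PySem.List.min? languages (fun x => x)).getD ""
      if languages.length > 1 then m ++ " and others" else m
  PySem.Str.replace ((PySem.Dict.mk pvCategoryDescriptions).getD category "") "{lang}" summary

-- eligible = sorted(filtered items, key=first); the dict comprehension over _ORDER is the
-- association list pvOrder.map …; the keys are unique so the sort key never ties.
def build_extension_payload_alt (extension_map : List (String × List String)) : (List (String × List (List (String × String)))) × List String :=
  let eligible := PySem.List.sorted (extension_map.filter (fun p => !pvBinaryExtensions.contains p.1)) (fun p => p.1) false
  (pvOrder.map (fun cat =>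
     (cat, (eligible.filter (fun p => pvCategoryOf.getD p.1 "programming" == cat)).map
        (fun p => [("ext", p.1), ("desc", pvDescribe cat p.2)]))),
   eligible.map Prod.fst)

-- ===== PRECONDITION & SPEC =====
-- Pre_ states the representation invariant of the dict argument (a Python dict's keys are unique);
-- it excludes no Python input: every dict satisfies it.
def Pre_build_extension_payload (extension_map : List (String × List String)) : Prop :=
  (extension_map.map Prod.fst).Nodup
instance (extension_map : List (String × List String)) : Decidable (Pre_build_extension_payload extension_map) := by unfold Pre_build_extension_payload; infer_instance

def pvWitness_build_extension_payload : (List (String × List String)) :=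
  [(".py", ["Python"]), (".md", ["Markdown", "Text"]), (".exe", [])]

def Spec_build_extension_payload (extension_map : List (String × List String)) (out : (List (String × List (List (String × String)))) × List String) : Prop := out = build_extension_payload_alt extension_map
instance (extension_map : List (String × List String)) (out : (List (String × List (List (String × String)))) × List String) : Decidable (Spec_build_extension_payload extension_map out) := by unfold Spec_build_extension_payload; infer_instance

-- ===== CLAIM (what is proved, stated in full; the proofs are below) =====
def Claim_equal_build_extension_payload : Prop := ∀ (extension_map : List (String × List String)), Dom_build_extension_payload extension_map → Pre_build_extension_payload extension_map → Spec_build_extension_payload extension_map (build_extension_payload extension_map)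

-- ===== LEMMAS AND PROOFS =====

theorem pvCat_eq (ext : String) : pvCategoryOf.getD ext "programming" = categorise_extension ext := by
  by_cases h0 : ext = ".html"
  · subst h0; decide
  by_cases h1 : ext = ".xml"
  · subst h1; decide
  by_cases h2 : ext = ".svg"
  · subst h2; decide
  by_cases h3 : ext = ".xhtml"
  · subst h3; decide
  by_cases h4 : ext = ".xht"
  · subst h4; decide
  by_cases h5 : ext = ".xaml"
  · subst h5; decide
  by_cases h6 : ext = ".json"
  · subst h6; decide
  by_cases h7 : ext = ".yaml"
  · subst h7; decide
  by_cases h8 : ext = ".yml"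
  · subst h8; decide
  by_cases h9 : ext = ".toml"
  · subst h9; decide
  by_cases h10 : ext = ".ini"
  · subst h10; decide
  by_cases h11 : ext = ".cfg"
  · subst h11; decide
  by_cases h12 : ext = ".conf"
  · subst h12; decide
  by_cases h13 : ext = ".properties"
  · subst h13; decide
  by_cases h14 : ext = ".csv"
  · subst h14; decide
  by_cases h15 : ext = ".tsv"
  · subst h15; decide
  by_cases h16 : ext = ".sql"
  · subst h16; decide
  by_cases h17 : ext = ".graphql"
  · subst h17; decide
  by_cases h18 : ext = ".md"
  · subst h18; decide
  by_cases h19 : ext = ".markdown"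
  · subst h19; decide
  by_cases h20 : ext = ".rst"
  · subst h20; decide
  by_cases h21 : ext = ".txt"
  · subst h21; decide
  by_cases h22 : ext = ".asciidoc"
  · subst h22; decide
  by_cases h23 : ext = ".adoc"
  · subst h23; decide
  by_cases h24 : ext = ".diff"
  · subst h24; decide
  by_cases h25 : ext = ".patch"
  · subst h25; decide
  by_cases h26 : ext = ".log"
  · subst h26; decide
  simp [pvCategoryOf, pvCategoryRules, categorise_extension, PySem.Dict.getD_eq_get?_getD, PySem.Dict.get?_insert, PySem.Dict.get?_empty, List.find?, h0, h1, h2, h3, h4, h5, h6, h7, h8, h9, h10, h11, h12, h13, h14, h15, h16, h17, h18, h19, h20, h21, h22, h23, h24, h25, h26]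

theorem pvCat_mem_order (ext : String) : pvCategoryOf.getD ext "programming" ∈ pvOrder := by
  rw [pvCat_eq]
  unfold categorise_extension
  cases hf : pvCategoryRules.find? (fun p => p.2.contains ext) with
  | none => decide
  | some p =>
    have hp : p ∈ pvCategoryRules := List.mem_of_find?_eq_some hf
    fin_cases hp <;> decide

theorem pvSortedHead_eq_min (langs : List String) (x : String) (s : List String)
    (h : PySem.List.sorted langs (fun y => y) false = x :: s) :
    PySem.List.min? langs (fun y => y) = some x := by
  have hperm : (PySem.List.sorted langs (fun y => y) false).Perm langs := PySem.List.sorted_perm _ _ _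
  have hxmem : x ∈ langs := hperm.mem_iff.mp (by simp [h])
  have hne : langs ≠ [] := by
    intro hnil
    rw [(PySem.List.sorted_eq_nil_iff langs (fun y => y) false).mpr hnil] at h
    exact (List.cons_ne_nil x s) h.symm
  obtain ⟨m, hm⟩ : ∃ m, PySem.List.min? langs (fun y => y) = some m := by
    cases hmm : PySem.List.min? langs (fun y => y) with
    | none => exact absurd ((PySem.List.min?_eq_none_iff langs (fun y => y)).mp hmm) hne
    | some m => exact ⟨m, rfl⟩
  have hxle : ∀ y ∈ langs, x ≤ y := by
    intro y hy
    have hys : y ∈ x :: s := by rw [← h]; exact hperm.mem_iff.mpr hy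
    have hpw := PySem.List.sorted_pairwise langs (fun y => y)
    rw [h] at hpw
    rcases hys with _ | hys
    · exact le_refl _
    · exact (List.pairwise_cons.mp hpw).1 y (by assumption)
  have h1 : m ≤ x := PySem.List.min?_isMin hm x hxmem
  have h2 : x ≤ m := hxle m (PySem.List.min?_mem hm)
  rw [hm, le_antisymm h1 h2]

theorem pvDescribe_eq (category : String) (languages : List String) :
    pvDescribe category languages =
      PySem.Str.replace ((PySem.Dict.mk pvCategoryDescriptions).getD category "") "{lang}" (language_summary languages) := by
  unfold pvDescribe language_summary
  cases hL : languages with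
  | nil => simp [PySem.List.sorted]
  | cons a t =>
    have hnil : PySem.List.sorted (a :: t) (fun y => y) false ≠ [] := by
      simp [PySem.List.sorted_eq_nil_iff]
    cases hs : PySem.List.sorted (a :: t) (fun y => y) false with
    | nil => exact absurd hs hnil
    | cons x s =>
      have hmin := pvSortedHead_eq_min (a :: t) x s hs
      have hlen : (x :: s).length = (a :: t).length := by
        rw [← hs]; exact (PySem.List.sorted_perm _ _ _).length_eq
      cases s with
      | nil =>
        have : t = [] := by simpa using hlen.symm
        subst this
        simp [hmin]
      | cons y r =>
        have hpos : 0 < t.length := by simp at hlen; omega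
        simp [hmin, hpos]

theorem pvInsertBy_map (x : String × List String) (ys : List (String × List String)) :
    (PySem.List.insertBy (fun a b => decide (a.1 < b.1)) x ys).map Prod.fst =
      PySem.List.insertBy (fun a b => decide (a < b)) x.1 (ys.map Prod.fst) := by
  induction ys with
  | nil => simp [PySem.List.insertBy]
  | cons y t ih =>
    simp only [PySem.List.insertBy, List.map_cons]
    split_ifs with h
    · simp
    · simp only [List.map_cons, ih]

theorem pvSorted_map_fst (em : List (String × List String)) :
    PySem.List.sorted (em.map Prod.fst) (fun x => x) false =
      (PySem.List.sorted em (fun p => p.1) false).map Prod.fst := by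
  rw [PySem.List.sorted_eq_foldl_insertBy, PySem.List.sorted_eq_foldl_insertBy]
  suffices h : ∀ (acc : List (String × List String)),
      List.foldl (fun acc x => PySem.List.insertBy (fun a b => decide (a < b)) x acc) (acc.map Prod.fst) (em.map Prod.fst) =
        (List.foldl (fun acc x => PySem.List.insertBy (fun a b => decide (a.1 < b.1)) x acc) acc em).map Prod.fst by
    simpa using h []
  induction em with
  | nil => intro acc; simp
  | cons p t ih =>
    intro acc
    simp only [List.map_cons, List.foldl_cons]
    rw [← pvInsertBy_map, ih]

-- A's key-fold rewritten as a fold over the (key, value) pairs with the reverse index and min-based summary.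
theorem pvFold_eq (em : List (String × List String)) (l : List (String × List String)) :
    ∀ (text : PySem.Dict String (List (List (String × String)))) (alls : List String),
    (∀ p ∈ l, (PySem.Dict.mk em).getD p.1 [] = p.2) →
    (l.map Prod.fst).Nodup →
    (∀ p ∈ l, alls.contains p.1 = false) →
    List.foldl
      (fun st ext =>
        if pvBinaryExtensions.contains ext then st
        else
          (st.1.modify (categorise_extension ext) []
            (fun l => l ++ [[("ext", ext), ("desc", PySem.Str.replace ((PySem.Dict.mk pvCategoryDescriptions).getD (categorise_extension ext) "") "{lang}" (language_summary ((PySem.Dict.mk em).getD ext [])))]]),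
           if st.2.contains ext then st.2 else st.2 ++ [ext]))
      (text, alls) (l.map Prod.fst) =
    List.foldl
      (fun st p =>
        if pvBinaryExtensions.contains p.1 then st
        else
          (st.1.modify (pvCategoryOf.getD p.1 "programming") []
            (fun l => l ++ [[("ext", p.1), ("desc", pvDescribe (pvCategoryOf.getD p.1 "programming") p.2)]]),
           st.2 ++ [p.1]))
      (text, alls) l := by
  induction l with
  | nil => intro text alls _ _ _; rfl
  | cons p t ih =>
    intro text alls hlk hnd halls
    simp only [List.map_cons, List.foldl_cons]
    have hnd2 : (p.1 :: t.map Prod.fst).Nodup := by simpa only [List.map_cons] using hnd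
    by_cases hb : pvBinaryExtensions.contains p.1
    · rw [if_pos hb, if_pos hb]
      exact ih text alls (fun q hq => hlk q (List.mem_cons_of_mem _ hq))
        hnd2.of_cons (fun q hq => halls q (List.mem_cons_of_mem _ hq))
    · rw [if_neg hb, if_neg hb]
      have hv : (PySem.Dict.mk em).getD p.1 [] = p.2 := hlk p (List.mem_cons_self ..)
      have hcon : alls.contains p.1 = false := halls p (List.mem_cons_self ..)
      have hkne : ∀ q ∈ t, q.1 ≠ p.1 := by
        intro q hq heq
        exact (List.nodup_cons.mp hnd2).1 (heq ▸ List.mem_map_of_mem hq)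
      rw [hv, pvCat_eq p.1, ← pvDescribe_eq, hcon]
      simp only [Bool.false_eq_true, if_false]
      exact ih _ (alls ++ [p.1]) (fun q hq => hlk q (List.mem_cons_of_mem _ hq))
        hnd2.of_cons
        (by
          intro q hq
          have h1 := halls q (List.mem_cons_of_mem _ hq)
          simp only [List.contains_eq_mem, decide_eq_false_iff_not] at h1 ⊢
          simp [List.mem_append, h1, hkne q hq])

-- skip-binary pair-fold: the two state components are independent, so the fold splits into the
-- dict fold over the eligible sublist and a plain append of the eligible keys
theorem pvFoldAll (l : List (String × List String)) :
    ∀ (d : PySem.Dict String (List (List (String × String)))) (s : List String),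
    l.foldl
      (fun (st : PySem.Dict String (List (List (String × String))) × List String) p =>
        if pvBinaryExtensions.contains p.1 then st
        else
          (st.1.modify (pvCategoryOf.getD p.1 "programming") []
            (fun l => l ++ [[("ext", p.1), ("desc", pvDescribe (pvCategoryOf.getD p.1 "programming") p.2)]]),
           st.2 ++ [p.1]))
      (d, s)
    = ((l.filter (fun p => !pvBinaryExtensions.contains p.1)).foldl
         (fun d p => d.modify (pvCategoryOf.getD p.1 "programming") []
           (fun l => l ++ [[("ext", p.1), ("desc", pvDescribe (pvCategoryOf.getD p.1 "programming") p.2)]])) d,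
       s ++ (l.filter (fun p => !pvBinaryExtensions.contains p.1)).map Prod.fst) := by
  induction l with
  | nil => intro d s; simp
  | cons p t ih =>
    intro d s
    simp only [List.foldl_cons, List.filter_cons]
    by_cases h : pvBinaryExtensions.contains p.1
    · simp only [h, Bool.not_true, Bool.false_eq_true, if_false, if_true]
      exact ih d s
    · simp only [h, Bool.not_false, Bool.false_eq_true, if_false, if_true,
        List.foldl_cons, List.map_cons]
      rw [ih]
      simp only [List.append_assoc, List.singleton_append]

theorem pvMain (em : List (String × List String)) (hpre : (em.map Prod.fst).Nodup) :
    build_extension_payload em = build_extension_payload_alt em := by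
  unfold build_extension_payload build_extension_payload_alt
  simp only [PySem.Dict.keys_mk]
  rw [pvSorted_map_fst]
  set S := PySem.List.sorted em (fun p => p.1) false with hS
  have hperm : S.Perm em := PySem.List.sorted_perm _ _ _
  have hlk : ∀ p ∈ S, (PySem.Dict.mk em).getD p.1 [] = p.2 := by
    intro p hp
    have hmem : p ∈ em := hperm.mem_iff.mp hp
    exact PySem.Dict.getD_of_mem_items (PySem.Dict.mk em) (by exact hmem) (by simpa using hpre) []
  have hndS : (S.map Prod.fst).Nodup := (hperm.map Prod.fst).nodup_iff.mpr hpre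
  rw [pvFold_eq em S _ _ hlk hndS (by intro q hq; rfl)]
  rw [pvFoldAll]
  set q : (String × List String) → Bool := fun p => !pvBinaryExtensions.contains p.1 with hq
  set E := S.filter q with hE
  -- S is strictly increasing on keys, hence so is its sublist E
  have hpwS : S.Pairwise (fun a b => a.1 < b.1) := by
    have h1 : S.Pairwise (fun a b => a.1 ≤ b.1) := PySem.List.sorted_pairwise _ _
    have h2 : S.Pairwise (fun a b => a.1 ≠ b.1) := List.pairwise_map.mp hndS
    exact (h1.and h2).imp (fun h => lt_of_le_of_ne h.1 h.2)
  have hpwE : E.Pairwise (fun a b => a.1 < b.1) := hpwS.sublist (List.filter_sublist)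
  -- B's eligible list IS E: any strictly key-increasing rearrangement is the sorted order
  have hElig : PySem.List.sorted (em.filter q) (fun p => p.1) false = E := by
    refine PySem.List.sorted_eq_of_perm_of_pairwise_lt _ _ _ ?_ hpwE
    exact hperm.filter q
  rw [hElig]
  -- flat list: E.map fst is already sorted
  have hsnd : PySem.List.sorted (E.map Prod.fst) (fun x => x) false = E.map Prod.fst := by
    refine PySem.List.sorted_eq_of_perm_of_pairwise_lt _ _ _ (List.Perm.refl _) ?_
    exact (List.pairwise_map).mpr hpwE
  simp only [List.nil_append]
  rw [hsnd]
  -- dict side: items of the bucket fold = per-category filters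
  set d0 : PySem.Dict String (List (List (String × String))) :=
    PySem.Dict.ofList [("programming", []), ("markup", []), ("config", []), ("data", []), ("documentation", []), ("other", [])] with hd0
  set cat : (String × List String) → String := fun p => pvCategoryOf.getD p.1 "programming" with hcat
  set entry : (String × List String) → List (String × String) :=
    fun p => [("ext", p.1), ("desc", pvDescribe (cat p) p.2)] with hentry
  set D := E.foldl (fun d p => d.modify (cat p) [] (fun l => l ++ [entry p])) d0 with hD
  have hkeys : D.keys = pvOrder := by
    rw [hD, PySem.Dict.keys_foldl_modify_key E cat [] (fun _ p => fun l => l ++ [entry p]) d0]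
    have hk0 : d0.keys = pvOrder := by decide
    rw [hk0, PySem.Set.update_eq_append_filter]
    have : (PySem.Set.ofList (E.map cat)).filter (fun y => !PySem.Set.contains pvOrder y) = [] := by
      rw [List.filter_eq_nil_iff]
      intro y hy
      have hy' : y ∈ E.map cat := (PySem.Set.mem_ofList _ _).mp hy
      obtain ⟨p, _, hpy⟩ := List.mem_map.mp hy'
      have : y ∈ pvOrder := hpy ▸ pvCat_mem_order p.1
      simp [PySem.Set.contains, this]
    rw [this, List.append_nil]
  have hgetD : ∀ c ∈ pvOrder, D.getD c [] =
      (E.filter (fun p => cat p == c)).map (fun p => [("ext", p.1), ("desc", pvDescribe c p.2)]) := by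
    intro c hc
    have hmap : D = (E.map (fun p => (cat p, entry p))).foldl
        (fun d r => d.modify r.1 [] (fun l => l ++ [r.2])) d0 := by
      rw [hD, List.foldl_map]
    rw [hmap, PySem.Dict.getD_foldl_modify_append]
    have h0 : d0.getD c [] = [] := by
      fin_cases hc <;> decide
    rw [h0, List.nil_append, List.filter_map, List.map_map]
    have hfe : (fun (r : String × List (String × String)) => r.1 == c) ∘ (fun p => (cat p, entry p))
        = fun p => cat p == c := rfl
    rw [hfe]
    refine List.map_congr_left ?_
    intro p hp
    have hpc : cat p = c := by
      have := (List.mem_filter.mp hp).2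
      simpa using this
    simp [Function.comp, hentry, hpc]
  have hitems : D.items = pvOrder.map (fun c =>
      (c, (E.filter (fun p => cat p == c)).map (fun p => [("ext", p.1), ("desc", pvDescribe c p.2)]))) := by
    rw [PySem.Dict.items_eq_map_keys D (by rw [hkeys]; decide) [], hkeys]
    exact List.map_congr_left (fun c hc => by rw [hgetD c hc])
  rw [hitems]

-- ===== VERDICT (by name: the statement is the Claim_ definition above) =====
theorem build_extension_payload_spec : Claim_equal_build_extension_payload := by
  intro extension_map _ hpre
  unfold Spec_build_extension_payload
  exact pvMain extension_map hpre
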